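-- pv_equiv track=rewrite | github.com/Vskesha/leetcode_solutions | leetcode_solutions/p1569_number_of_ways_to_reorder_array_to_get_same_bst.py | numOfWays
-- ===== SOURCE A (Python) =====
-- import math
-- from typing import List
--
-- def numOfWays(nums: List[int]) -> int:
--     def num_of_ways(arr: list) -> int:
--         n = len(arr)
--         if n < 3:
--             return 1
--
--         left_arr, right_arr, root = [], [], arr[0]
--         for i in range(1, n):
--             if arr[i] < root:
--                 left_arr.append(arr[i])
--             else:
--                 right_arr.append(arr[i])
--
--         left_ways = num_of_ways(left_arr)
--         right_ways = num_of_ways(right_arr)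
--         combs = math.comb(n - 1, len(left_arr))
--
--         return combs * left_ways * right_ways % 1000000007
--
--     return num_of_ways(nums) - 1
-- ===== SOURCE B (Python) =====
-- import math
--
-- def numOfWays(nums):
--     # Build an explicit BST (ties go right), then a post-order pass that
--     # returns each subtree's size while accumulating the product of
--     # comb(size-1, left_size) mod 1e9+7.
--     def insert(t, x):
--         if t is None:
--             return (x, None, None)
--         v, l, r = t
--         if x < v:
--             return (v, insert(l, x), r)
--         return (v, l, insert(r, x))
--
--     def count(t):
--         if t is None:
--             return (0, 1)
--         _, l, r = t
--         ls, lp = count(l)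
--         rs, rp = count(r)
--         return (ls + rs + 1, lp * rp * math.comb(ls + rs, ls) % 1000000007)
--
--     root = None
--     for x in nums:
--         root = insert(root, x)
--     return count(root)[1] - 1
-- ===== Notes on version B (the rewrite author's own statement) =====
-- stated objective: alternative
-- what changed: Instead of recursively partitioning the array around its first element, B materialises the BST by inserting the elements in order and then computes the answer in one post-order traversal that returns subtree sizes and accumulates the product of binomials mod 1e9+7.
import Mathlib
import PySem

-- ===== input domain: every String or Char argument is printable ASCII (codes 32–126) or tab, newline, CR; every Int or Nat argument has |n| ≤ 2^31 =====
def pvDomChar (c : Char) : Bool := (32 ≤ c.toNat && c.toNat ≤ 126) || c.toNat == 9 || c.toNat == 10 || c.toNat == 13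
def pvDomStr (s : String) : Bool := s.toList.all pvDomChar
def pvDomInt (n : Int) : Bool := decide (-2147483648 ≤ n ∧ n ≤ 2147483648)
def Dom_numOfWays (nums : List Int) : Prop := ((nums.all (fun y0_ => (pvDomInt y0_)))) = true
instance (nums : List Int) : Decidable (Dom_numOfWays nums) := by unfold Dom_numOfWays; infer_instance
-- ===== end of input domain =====

-- B builds the BST explicitly and computes the product in one post-order pass; alternative decomposition, same cost.

-- ===== PORT A =====
-- the for-loop of A partitioning arr[1:] into left_arr / right_arr
def pvPartition (root : Int) (rest : List Int) : List Int × List Int :=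
  rest.foldl (fun (p : List Int × List Int) x =>
    if x < root then (p.1 ++ [x], p.2) else (p.1, p.2 ++ [x])) ([], [])

-- needed by the port's termination proof
theorem pvPartition_eq (root : Int) (rest : List Int) :
    pvPartition root rest =
      (rest.filter (fun x => decide (x < root)), rest.filter (fun x => !decide (x < root))) := by
  unfold pvPartition
  suffices h : ∀ (l r : List Int),
      rest.foldl (fun (p : List Int × List Int) x =>
        if x < root then (p.1 ++ [x], p.2) else (p.1, p.2 ++ [x])) (l, r) =
      (l ++ rest.filter (fun x => decide (x < root)),
       r ++ rest.filter (fun x => !decide (x < root))) by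
    simpa using h [] []
  induction rest with
  | nil => intro l r; simp
  | cons y ys ih =>
    intro l r
    by_cases hy : y < root <;> simp [hy, ih, List.append_assoc]

def numOfWaysRec (arr : List Int) : Int :=
  if arr.length < 3 then 1
  else
    match arr with
    | [] => 1
    | root :: rest =>
      let st := pvPartition root rest
      PySem.Int.mod ((Nat.choose (arr.length - 1) st.1.length : Int) *
        numOfWaysRec st.1 * numOfWaysRec st.2) 1000000007
termination_by arr.length
decreasing_by
  · simp only [pvPartition_eq]
    have := List.length_filter_le (fun x => decide (x < root)) rest
    simp only [List.length_cons]; omega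
  · simp only [pvPartition_eq]
    have := List.length_filter_le (fun x => !decide (x < root)) rest
    simp only [List.length_cons]; omega

def numOfWays (nums : List Int) : Int := numOfWaysRec nums - 1

-- ===== PORT B =====
inductive PVTree where
  | leaf : PVTree
  | node : Int → PVTree → PVTree → PVTree

def pvInsert : PVTree → Int → PVTree
  | .leaf, x => .node x .leaf .leaf
  | .node v l r, x => if x < v then .node v (pvInsert l x) r else .node v l (pvInsert r x)

-- post-order: returns (subtree size, product of comb(size-1, left size) mod 1e9+7)
def pvCount : PVTree → Nat × Int
  | .leaf => (0, 1)
  | .node _ l r =>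
    let lc := pvCount l
    let rc := pvCount r
    (lc.1 + rc.1 + 1,
     PySem.Int.mod (lc.2 * rc.2 * (Nat.choose (lc.1 + rc.1) lc.1 : Int)) 1000000007)

def numOfWays_alt (nums : List Int) : Int :=
  (pvCount (nums.foldl pvInsert .leaf)).2 - 1

-- ===== PRECONDITION & SPEC =====
def Spec_numOfWays (nums : List Int) (out : Int) : Prop := out = numOfWays_alt nums
instance (nums : List Int) (out : Int) : Decidable (Spec_numOfWays nums out) := by unfold Spec_numOfWays; infer_instance

-- ===== CLAIM (what is proved, stated in full; the proofs are below) =====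
def Claim_equal_numOfWays : Prop := ∀ (nums : List Int), Dom_numOfWays nums → Spec_numOfWays nums (numOfWays nums)

-- ===== LEMMAS AND PROOFS =====

-- inserting a list into a node distributes over the BST's comparison
theorem foldl_insert_node (xs : List Int) (v : Int) :
    ∀ (l r : PVTree), xs.foldl pvInsert (.node v l r) =
      .node v ((xs.filter (fun x => decide (x < v))).foldl pvInsert l)
              ((xs.filter (fun x => !decide (x < v))).foldl pvInsert r) := by
  induction xs with
  | nil => intro l r; simp
  | cons y ys ih =>
    intro l r
    by_cases hy : y < v <;> simp [pvInsert, hy, ih]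

theorem pvCount_insert_size (t : PVTree) (x : Int) :
    (pvCount (pvInsert t x)).1 = (pvCount t).1 + 1 := by
  induction t with
  | leaf => simp [pvInsert, pvCount]
  | node v l r ihl ihr =>
    by_cases hx : x < v <;> simp [pvInsert, hx, pvCount, ihl, ihr] <;> omega

theorem pvCount_build_size (xs : List Int) :
    ∀ t : PVTree, (pvCount (xs.foldl pvInsert t)).1 = (pvCount t).1 + xs.length := by
  induction xs with
  | nil => intro t; simp
  | cons y ys ih =>
    intro t
    simp [List.foldl_cons, ih, pvCount_insert_size]
    omega

theorem numOfWaysRec_eq_count (arr : List Int) :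
    numOfWaysRec arr = (pvCount (arr.foldl pvInsert .leaf)).2 := by
  induction arr using numOfWaysRec.induct with
  | case1 x hx =>
    -- length < 3 : both sides are 1
    match x, hx with
    | [], _ => simp [numOfWaysRec, pvCount]
    | [a], _ =>
      simp [numOfWaysRec, pvCount, pvInsert]
    | [a, b], _ =>
      by_cases hb : b < a <;>
        simp [numOfWaysRec, pvCount, pvInsert, hb, Nat.choose_self]
    | a :: b :: c :: t, hx => exfalso; simp at hx; omega
  | case2 h => simp [numOfWaysRec, pvCount]
  | case3 root rest st h ihl ihr =>
    have hst : st = (rest.filter (fun x => decide (x < root)),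
        rest.filter (fun x => !decide (x < root))) := pvPartition_eq root rest
    rw [hst] at ihl ihr
    rw [numOfWaysRec, if_neg h]
    show PySem.Int.mod
        ((Nat.choose ((root :: rest).length - 1) (pvPartition root rest).1.length : Int) *
          numOfWaysRec (pvPartition root rest).1 * numOfWaysRec (pvPartition root rest).2)
        1000000007 = _
    rw [pvPartition_eq]
    have hbuild : (root :: rest).foldl pvInsert .leaf =
        PVTree.node root
          ((rest.filter (fun x => decide (x < root))).foldl pvInsert .leaf)
          ((rest.filter (fun x => !decide (x < root))).foldl pvInsert .leaf) := by
      rw [List.foldl_cons]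
      show rest.foldl pvInsert (.node root .leaf .leaf) = _
      rw [foldl_insert_node]
    rw [hbuild]
    have hls : (pvCount ((rest.filter (fun x => decide (x < root))).foldl pvInsert .leaf)).1 =
        (rest.filter (fun x => decide (x < root))).length := by
      simpa [pvCount] using pvCount_build_size (rest.filter (fun x => decide (x < root))) .leaf
    have hrs : (pvCount ((rest.filter (fun x => !decide (x < root))).foldl pvInsert .leaf)).1 =
        (rest.filter (fun x => !decide (x < root))).length := by
      simpa [pvCount] using pvCount_build_size (rest.filter (fun x => !decide (x < root))) .leaf
    show _ = (pvCount (PVTree.node root _ _)).2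
    simp only [pvCount, hls, hrs, ihl, ihr, List.length_cons, Nat.add_sub_cancel]
    rw [List.length_eq_length_filter_add (l := rest) (f := fun x => decide (x < root))]
    congr 1
    ring

-- ===== VERDICT (by name: the statement is the Claim_ definition above) =====
theorem numOfWays_spec : Claim_equal_numOfWays := by
  intro nums _
  show numOfWays nums = numOfWays_alt nums
  unfold numOfWays numOfWays_alt
  rw [numOfWaysRec_eq_count]
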